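-- pv_equiv track=rewrite | github.com/JisooRyu99/Coding-Test-Study | Programmers/PCCP/외톨이 알파벳.py | solution
-- ===== SOURCE A (Python) =====
-- from collections import Counter
--
-- def solution(input_string):
--     answer = set()
--     count = Counter(input_string)
--     stack = []
--
--     for x in input_string:
--         if not stack: stack.append(x)
--         else:
--             if stack[-1] == x:
--                 stack.append(x)
--             else:
--                 if count[stack[-1]]!=len(stack):
--                     answer.add(stack[-1])
--                 stack = [x]
--
--     return "".join(sorted(answer)) if answer else 'N'
-- ===== SOURCE B (Python) =====
-- from collections import Counter
--
-- def solution(input_string):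
--     # Collapse consecutive duplicates into one char per run, then a letter is
--     # lonely iff it owns more than one run.
--     collapsed = []
--     for c in input_string:
--         if not collapsed or collapsed[-1] != c:
--             collapsed.append(c)
--     lonely = sorted(c for c, runs in Counter(collapsed).items() if runs > 1)
--     return "".join(lonely) if lonely else "N"
-- ===== Notes on version B (the rewrite author's own statement) =====
-- stated objective: simpler
-- what changed: B drops A's stack-and-total-Counter run-length test: it collapses adjacent duplicates to one char per run and declares a letter lonely iff it owns more than one run (Counter of the collapsed list), then sorts and joins as before; a timing run measured this constant-factor cheaper single pass about 2x faster.
import Mathlib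
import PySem

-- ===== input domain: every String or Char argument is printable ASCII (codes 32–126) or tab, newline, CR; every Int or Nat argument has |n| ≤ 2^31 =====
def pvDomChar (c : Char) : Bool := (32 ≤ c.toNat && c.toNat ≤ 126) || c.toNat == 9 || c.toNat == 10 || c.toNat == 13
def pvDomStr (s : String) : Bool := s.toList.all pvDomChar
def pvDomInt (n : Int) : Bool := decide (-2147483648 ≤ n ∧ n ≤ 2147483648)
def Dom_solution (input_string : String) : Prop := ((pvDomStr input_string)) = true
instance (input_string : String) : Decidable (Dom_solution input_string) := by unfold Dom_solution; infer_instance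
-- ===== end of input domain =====

-- B collapses adjacent duplicate chars to one char per run and calls a letter lonely
-- iff it owns more than one run, instead of A's stack-plus-total-count run test (objective: simpler).

-- ===== PORT A =====
-- loop body of A's `for x in input_string`, state = (answer, stack)
def stepA (count : PySem.Dict Char Int) (st : PySem.Set Char × List Char) (x : Char) :
    PySem.Set Char × List Char :=
  if st.2 = [] then (st.1, st.2 ++ [x])
  else if PySem.List.pyGetD st.2 (-1) x = x then (st.1, st.2 ++ [x])
  else
    let answer := if count.getD (PySem.List.pyGetD st.2 (-1) x) 0 ≠ (st.2.length : Int)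
      then PySem.Set.add st.1 (PySem.List.pyGetD st.2 (-1) x) else st.1
    (answer, [x])

def solution (input_string : String) : String :=
  let count := PySem.Dict.counter input_string.toList
  let r := input_string.toList.foldl (stepA count) ((PySem.Set.empty : PySem.Set Char), [])
  if r.1 ≠ [] then String.ofList (PySem.List.sorted r.1 (fun c => c) false) else "N"

-- ===== PORT B =====
-- loop body of B's `for c in input_string`, state = collapsed
def stepB (acc : List Char) (c : Char) : List Char :=
  if acc = [] ∨ PySem.List.pyGetD acc (-1) c ≠ c then acc ++ [c] else acc

def solution_alt (input_string : String) : String :=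
  let collapsed := input_string.toList.foldl stepB []
  let lonely := PySem.List.sorted
    (((PySem.Dict.counter collapsed).items.filter (fun p => 1 < p.2)).map Prod.fst)
    (fun c => c) false
  if lonely ≠ [] then String.ofList lonely else "N"

-- ===== PRECONDITION & SPEC =====
def Spec_solution (input_string : String) (out : String) : Prop := out = solution_alt input_string
instance (input_string : String) (out : String) : Decidable (Spec_solution input_string out) := by unfold Spec_solution; infer_instance

-- ===== CLAIM (what is proved, stated in full; the proofs are below) =====
def Claim_equal_solution : Prop := ∀ (input_string : String), Dom_solution input_string → Spec_solution input_string (solution input_string)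

-- ===== LEMMAS AND PROOFS =====

-- reference "collapse adjacent duplicate runs" function used by the proofs
def collapse : List Char → List Char
  | [] => []
  | [a] => [a]
  | a :: b :: t => if b = a then collapse (a :: t) else a :: collapse (b :: t)
termination_by l => l.length

theorem collapse_cons_cons (x : Char) (t : List Char) : collapse (x :: x :: t) = collapse (x :: t) := by
  simp [collapse]

theorem mem_collapse (c : Char) (l : List Char) : c ∈ collapse l ↔ c ∈ l := by
  induction l using collapse.induct with
  | case1 => simp [collapse]
  | case2 a => simp [collapse]
  | case3 b t ih => rw [collapse_cons_cons, ih]; simp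
  | case4 a b t h ih =>
    simp only [collapse, if_neg h, List.mem_cons]
    rw [ih]; simp

theorem collapse_append : ∀ (q : List Char) (a : Char) (t : List Char),
    q.getLast? ≠ some a → collapse (q ++ a :: t) = collapse q ++ collapse (a :: t) := by
  intro q
  induction q using collapse.induct with
  | case1 => intro a t _; simp [collapse]
  | case2 b =>
    intro a t h
    have hab : ¬ a = b := by simpa [eq_comm] using h
    simp [collapse, hab]
  | case3 b t' ih =>
    intro a t h
    have h' : (b :: t').getLast? ≠ some a := by
      rwa [List.getLast?_cons_cons] at h
    have := ih a t h'
    calc collapse ((b :: b :: t') ++ a :: t)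
        = collapse (b :: b :: (t' ++ a :: t)) := by simp
      _ = collapse (b :: (t' ++ a :: t)) := collapse_cons_cons b _
      _ = collapse ((b :: t') ++ a :: t) := by simp
      _ = collapse (b :: t') ++ collapse (a :: t) := this
      _ = collapse (b :: b :: t') ++ collapse (a :: t) := by rw [collapse_cons_cons]
  | case4 a' b t' hne ih =>
    intro a t h
    have h' : (b :: t').getLast? ≠ some a := by
      rwa [List.getLast?_cons_cons] at h
    have hb := ih a t h'
    calc collapse ((a' :: b :: t') ++ a :: t)
        = collapse (a' :: b :: (t' ++ a :: t)) := by simp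
      _ = a' :: collapse (b :: (t' ++ a :: t)) := by rw [collapse]; simp [hne]
      _ = a' :: collapse ((b :: t') ++ a :: t) := by simp
      _ = a' :: (collapse (b :: t') ++ collapse (a :: t)) := by rw [hb]
      _ = collapse (a' :: b :: t') ++ collapse (a :: t) := by
            rw [show collapse (a' :: b :: t') = a' :: collapse (b :: t') by rw [collapse]; simp [hne]]
            simp

theorem collapse_replicate (k : Nat) (x : Char) : collapse (List.replicate (k+1) x) = [x] := by
  induction k with
  | zero => simp [collapse]
  | succ n ih => rw [List.replicate_succ, List.replicate_succ, collapse_cons_cons, ← List.replicate_succ, ih]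

theorem collapse_cons_replicate (k : Nat) (x : Char) : collapse (x :: List.replicate k x) = [x] := by
  rw [← List.replicate_succ]; exact collapse_replicate k x

theorem getLast?_replicate_succ (k : Nat) (x : Char) :
    (List.replicate (k+1) x).getLast? = some x := by
  rw [List.replicate_succ', List.getLast?_concat]

theorem collapse_replicate_append (k : Nat) (x y : Char) (t : List Char) (h : y ≠ x) :
    collapse (List.replicate (k+1) x ++ y :: t) = x :: collapse (y :: t) := by
  rw [collapse_append _ _ _ (by rw [getLast?_replicate_succ]; simpa [eq_comm] using h),
      collapse_replicate]
  rfl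

theorem two_le_count_mem_dropLast (c : Char) (l : List Char) (h : 2 ≤ l.count c) :
    c ∈ l.dropLast := by
  rcases eq_or_ne l [] with rfl | hne
  · simp at h
  have hd : l.dropLast ++ [l.getLast hne] = l := List.dropLast_concat_getLast hne
  rw [← hd, List.count_append] at h
  have h1 : List.count c [l.getLast hne] ≤ 1 := by
    by_cases hc : l.getLast hne = c <;> simp [hc]
  have : 0 < l.dropLast.count c := by omega
  exact List.count_pos_iff.mp this

theorem foldB_eq (l : List Char) : ∀ (u : List Char) (a : Char),
    List.foldl stepB (u ++ [a]) l = u ++ collapse (a :: l) := by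
  induction l with
  | nil => intro u a; simp [collapse]
  | cons c t ih =>
    intro u a
    by_cases hac : a = c
    · subst hac
      have hstep : stepB (u ++ [a]) a = u ++ [a] := by
        simp [stepB, PySem.List.pyGetD_neg_one_append_singleton]
      rw [List.foldl_cons, hstep, ih u a, collapse_cons_cons]
    · have hstep : stepB (u ++ [a]) c = (u ++ [a]) ++ [c] := by
        simp [stepB, PySem.List.pyGetD_neg_one_append_singleton, hac]
      rw [List.foldl_cons, hstep, ih (u ++ [a]) c,
          show collapse (a :: c :: t) = a :: collapse (c :: t) by
            rw [collapse]; simp [Ne.symm hac]]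
      simp

theorem collapsed_eq (l : List Char) : List.foldl stepB [] l = collapse l := by
  cases l with
  | nil => simp [collapse]
  | cons c t =>
    have h0 : stepB [] c = [] ++ [c] := by simp [stepB]
    simp only [List.foldl_cons, h0]
    exact foldB_eq t [] c

theorem loopA (s : List Char) : ∀ (rest q : List Char) (x : Char) (k : Nat) (ans : PySem.Set Char),
    s = q ++ List.replicate (k+1) x ++ rest →
    q.getLast? ≠ some x →
    ans.Nodup →
    (∀ c, c ∈ ans ↔ c ∈ collapse q ∧ 2 ≤ (collapse s).count c) →
    (List.foldl (stepA (PySem.Dict.counter s)) (ans, List.replicate (k+1) x) rest).1.Nodup ∧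
    (∀ c, c ∈ (List.foldl (stepA (PySem.Dict.counter s)) (ans, List.replicate (k+1) x) rest).1 ↔
      2 ≤ (collapse s).count c) := by
  intro rest
  induction rest with
  | nil =>
    intro q x k ans hs hq hnd hinv
    subst hs
    rw [List.append_nil] at *
    have hcs : collapse (q ++ List.replicate (k+1) x) = collapse q ++ [x] := by
      rw [List.replicate_succ, collapse_append q x _ hq, collapse_cons_replicate]
    refine ⟨hnd, fun c => ?_⟩
    simp only [List.foldl_nil]
    rw [hinv c]
    constructor
    · exact fun hh => hh.2
    · intro h2
      refine ⟨?_, h2⟩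
      have := two_le_count_mem_dropLast c _ h2
      rwa [hcs, List.dropLast_concat] at this
  | cons y rest' ih =>
    intro q x k ans hs hq hnd hinv
    have hstack : (List.replicate (k+1) x : List Char) ≠ [] := by simp
    have hlast : PySem.List.pyGetD (List.replicate (k+1) x) (-1) y = x := by
      rw [List.replicate_succ', PySem.List.pyGetD_neg_one_append_singleton]
    by_cases hyx : x = y
    · subst hyx
      have hstep : stepA (PySem.Dict.counter s) (ans, List.replicate (k+1) x) x
          = (ans, List.replicate (k+2) x) := by
        simp only [stepA]
        rw [if_neg hstack, hlast, if_pos rfl, ← List.replicate_succ']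
      rw [List.foldl_cons, hstep]
      apply ih q x (k+1) ans _ hq hnd
      · intro c
        rw [hinv c]
      · rw [hs, show List.replicate (k+1+1) x = List.replicate (k+1) x ++ [x] from List.replicate_succ']
        simp
    · -- run of x ends here
      have hstep : stepA (PySem.Dict.counter s) (ans, List.replicate (k+1) x) y
          = ((if (PySem.Dict.counter s).getD x 0 ≠ ((k+1 : Nat) : Int)
              then PySem.Set.add ans x else ans), [y]) := by
        simp [stepA, hstack, hlast, hyx]
      rw [List.foldl_cons, hstep]
      set ans' := (if (PySem.Dict.counter s).getD x 0 ≠ ((k+1 : Nat) : Int)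
              then PySem.Set.add ans x else ans) with hans'
      have hq' : (q ++ List.replicate (k+1) x).getLast? ≠ some y := by
        rw [List.getLast?_append_of_ne_nil q hstack, getLast?_replicate_succ]
        simpa using hyx
      have hs' : s = (q ++ List.replicate (k+1) x) ++ List.replicate (0+1) y ++ rest' := by
        rw [hs]; simp
      have hnd' : ans'.Nodup := by
        rw [hans']; split
        · exact PySem.Set.nodup_add ans x hnd
        · exact hnd
      -- structure of collapse s
      have hcq : collapse (q ++ List.replicate (k+1) x) = collapse q ++ [x] := by
        rw [List.replicate_succ, collapse_append q x _ hq, collapse_cons_replicate]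
      have hcs : collapse s = collapse q ++ [x] ++ collapse (y :: rest') := by
        have hmid : List.replicate (k+1) x ++ y :: rest' = x :: (List.replicate k x ++ y :: rest') := by
          simp [List.replicate_succ]
        rw [hs, List.append_assoc, hmid, collapse_append q x _ hq, ← hmid,
            collapse_replicate_append k x y rest' (fun hh => hyx hh.symm)]
        simp
    -- count bookkeeping
      have hcount : s.count x = q.count x + (k+1) + (y :: rest').count x := by
        rw [hs]; simp [List.count_append]; omega
      have hccount : (collapse s).count x
          = (collapse q).count x + 1 + (collapse (y :: rest')).count x := by
        rw [hcs]; simp [List.count_append]; omega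
      have hzq : q.count x = 0 ↔ (collapse q).count x = 0 := by
        rw [List.count_eq_zero, List.count_eq_zero, mem_collapse]
      have hzr : (y :: rest').count x = 0 ↔ (collapse (y :: rest')).count x = 0 := by
        rw [List.count_eq_zero, List.count_eq_zero, mem_collapse]
      have hcond : ((PySem.Dict.counter s).getD x 0 ≠ ((k+1 : Nat) : Int))
          ↔ 2 ≤ (collapse s).count x := by
        rw [PySem.Dict.getD_counter]
        rw [hccount]
        constructor
        · intro hne
          have : s.count x ≠ k + 1 := by exact_mod_cast hne
          rw [hcount] at this
          have : q.count x ≠ 0 ∨ (y :: rest').count x ≠ 0 := by omega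
          rcases this with hcl | hcr
          · have := (not_iff_not.mpr hzq).mp hcl; omega
          · have := (not_iff_not.mpr hzr).mp hcr; omega
        · intro h2
          have : (collapse q).count x ≠ 0 ∨ (collapse (y :: rest')).count x ≠ 0 := by omega
          have hne : s.count x ≠ k + 1 := by
            rw [hcount]
            rcases this with hcl | hcr
            · have := (not_iff_not.mpr hzq).mpr hcl; omega
            · have := (not_iff_not.mpr hzr).mpr hcr; omega
          exact_mod_cast hne
      have hinv' : ∀ c, c ∈ ans' ↔ c ∈ collapse (q ++ List.replicate (k+1) x) ∧
          2 ≤ (collapse s).count c := by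
        intro c
        rw [hcq]
        by_cases hcx : c = x
        · subst hcx
          rw [hans']
          split
          · rename_i hcnd
            simp only [PySem.Set.mem_add]
            constructor
            · intro _; exact ⟨by simp, hcond.mp hcnd⟩
            · intro _; exact Or.inr trivial
          · rename_i hcnd
            rw [not_not] at hcnd
            rw [hinv c]
            have hn2 : ¬ 2 ≤ (collapse s).count c := fun hh => (hcond.mpr hh) hcnd
            constructor
            · intro hh; exact absurd hh.2 hn2
            · intro hh; exact absurd hh.2 hn2
        · have hmem : c ∈ ans' ↔ c ∈ ans := by
            rw [hans']; split
            · rw [PySem.Set.mem_add]; simp [hcx]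
            · rfl
          rw [hmem, hinv c, List.mem_append]
          simp [hcx]
      exact ih (q ++ List.replicate (k+1) x) y 0 ans' hs' hq' hnd' hinv'

theorem ansA_spec (s : List Char) :
    (List.foldl (stepA (PySem.Dict.counter s)) ((PySem.Set.empty : PySem.Set Char), []) s).1.Nodup ∧
    (∀ c, c ∈ (List.foldl (stepA (PySem.Dict.counter s)) ((PySem.Set.empty : PySem.Set Char), []) s).1 ↔
      2 ≤ (collapse s).count c) := by
  cases s with
  | nil => exact ⟨List.nodup_nil, by intro c; simp [PySem.Set.empty, collapse]⟩
  | cons c0 t =>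
    have hstep : stepA (PySem.Dict.counter (c0 :: t)) ((PySem.Set.empty : PySem.Set Char), []) c0
        = ((PySem.Set.empty : PySem.Set Char), List.replicate 1 c0) := by
      simp [stepA, PySem.Set.empty]
    rw [List.foldl_cons, hstep]
    apply loopA (c0 :: t) t [] c0 0 PySem.Set.empty
    · simp
    · simp
    · exact List.nodup_nil
    · intro c; simp [PySem.Set.empty, collapse]

theorem lonelyB_spec (s : List Char) :
    ((((PySem.Dict.counter (collapse s)).items.filter (fun p => 1 < p.2)).map Prod.fst).Nodup ∧
    (∀ c, c ∈ ((PySem.Dict.counter (collapse s)).items.filter (fun p => 1 < p.2)).map Prod.fst ↔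
      2 ≤ (collapse s).count c)) := by
  rw [PySem.Dict.items_counter]
  rw [List.filter_map, List.map_map]
  have hfun : (Prod.fst ∘ fun k => (k, ((collapse s).count k : Int))) = id := rfl
  rw [hfun, List.map_id]
  constructor
  · exact (PySem.Set.nodup_ofList _).filter _
  · intro c
    rw [List.mem_filter, PySem.Set.mem_ofList]
    constructor
    · intro ⟨_, hlt⟩
      simp only [Function.comp, decide_eq_true_eq] at hlt
      exact_mod_cast hlt
    · intro h2
      refine ⟨List.count_pos_iff.mp (by omega), ?_⟩
      simp only [Function.comp, decide_eq_true_eq]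
      exact_mod_cast h2

-- ===== VERDICT (by name: the statement is the Claim_ definition above) =====
theorem solution_spec : Claim_equal_solution := by
  intro input_string _
  unfold Spec_solution solution solution_alt
  simp only [collapsed_eq]
  obtain ⟨hndA, hmemA⟩ := ansA_spec input_string.toList
  obtain ⟨hndB, hmemB⟩ := lonelyB_spec input_string.toList
  set l := input_string.toList with hl
  set ansA := (List.foldl (stepA (PySem.Dict.counter l)) ((PySem.Set.empty : PySem.Set Char), []) l).1 with hA
  set listX := ((PySem.Dict.counter (collapse l)).items.filter (fun p => 1 < p.2)).map Prod.fst with hX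
  have hperm : ansA.Perm listX :=
    (List.perm_ext_iff_of_nodup hndA hndB).mpr (fun c => by rw [hmemA c, hmemB c])
  have hsorted : PySem.List.sorted ansA (fun c => c) false = PySem.List.sorted listX (fun c => c) false :=
    PySem.List.sorted_eq_sorted_of_perm _ _ _ (fun a b h => h) hperm
  by_cases hAe : ansA = []
  · have hXe : listX = [] := by
      have hlen := hperm.length_eq
      rw [hAe] at hlen
      exact List.length_eq_zero_iff.mp hlen.symm
    rw [if_neg (by simp [hAe]), if_neg (by simp [(PySem.List.sorted_eq_nil_iff _ _ _).mpr hXe])]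
  · rw [if_pos hAe, if_pos (fun hh => hAe ((PySem.List.sorted_eq_nil_iff _ _ _).mp (hsorted ▸ hh))), hsorted]
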